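-- pv_equiv track=rewrite | github.com/pypi-data/pypi-mirror-403 | packages/lintro/lintro-0.40.5.tar.gz/lintro-0.40.5/lintro/parsers/biome/biome_parser.py | _char_to_line_column
-- ===== SOURCE A (Python) =====
-- def _char_to_line_column(source_code: str, char_pos: int) -> tuple[int, int]:
--     """Convert character position to 1-based line and column numbers.
--
--     Args:
--         source_code: The source code string
--         char_pos: 0-based character position
--
--     Returns:
--         Tuple of (line, column) as 1-based numbers
--     """
--     if char_pos < 0:
--         return 1, 1
--
--     # Clamp to source code length
--     char_pos = min(char_pos, len(source_code))
--
--     line = 1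
--     column = 1
--
--     for i in range(char_pos):
--         if source_code[i] == "\n":
--             line += 1
--             column = 1
--         else:
--             column += 1
--
--     return line, column
-- ===== SOURCE B (Python) =====
-- def _char_to_line_column(source_code: str, char_pos: int) -> tuple[int, int]:
--     if char_pos < 0:
--         return 1, 1
--     char_pos = min(char_pos, len(source_code))
--     prefix = source_code[:char_pos]
--     return 1 + prefix.count("\n"), char_pos - prefix.rfind("\n")
-- ===== Notes on version B (the rewrite author's own statement) =====
-- stated objective: idiomatic
-- what changed: Replaces the fused stateful character loop (line/column counters updated per step) with two independent closed computations on the clamped prefix: line = 1 + prefix.count('\n') and column = char_pos - prefix.rfind('\n'), using rfind's -1 sentinel for the first line; the two C-level builtin passes replace the per-character interpreted loop.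
import Mathlib
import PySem

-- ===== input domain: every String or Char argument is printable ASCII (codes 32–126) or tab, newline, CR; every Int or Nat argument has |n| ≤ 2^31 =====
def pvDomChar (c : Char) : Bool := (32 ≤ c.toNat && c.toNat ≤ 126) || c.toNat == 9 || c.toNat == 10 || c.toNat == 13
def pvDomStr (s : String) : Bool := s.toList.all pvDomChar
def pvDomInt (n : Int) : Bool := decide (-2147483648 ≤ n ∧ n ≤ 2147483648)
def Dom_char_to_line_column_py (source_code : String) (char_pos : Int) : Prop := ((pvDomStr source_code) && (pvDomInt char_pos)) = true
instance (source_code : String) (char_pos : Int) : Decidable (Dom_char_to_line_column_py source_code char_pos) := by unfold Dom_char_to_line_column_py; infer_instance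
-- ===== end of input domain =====

-- B replaces A's fused stateful index loop with two independent prefix passes (count newlines / rfind the last newline); idiomatic, measured faster in a timing run (builtin passes vs per-char loop).

-- ===== PORT A =====
def char_to_line_column_py (source_code : String) (char_pos : Int) : Int × Int :=
  if char_pos < 0 then (1, 1)
  else
    let cp : Int := min char_pos (PySem.Str.len source_code)
    (PySem.List.pyRange 0 cp).foldl
      (fun lc i =>
        if PySem.Str.pyGet? source_code i == some '\n' then (lc.1 + 1, 1)
        else (lc.1, lc.2 + 1))
      (1, 1)

-- ===== PORT B =====
def char_to_line_column_py_alt (source_code : String) (char_pos : Int) : Int × Int :=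
  if char_pos < 0 then (1, 1)
  else
    let cp : Int := min char_pos (PySem.Str.len source_code)
    let pre := PySem.Str.slice source_code none (some cp)
    (1 + (PySem.Str.count pre "\n" : Int), cp - PySem.Str.rfind pre "\n")

-- ===== PRECONDITION & SPEC =====
def Spec_char_to_line_column_py (source_code : String) (char_pos : Int) (out : Int × Int) : Prop := out = char_to_line_column_py_alt source_code char_pos
instance (source_code : String) (char_pos : Int) (out : Int × Int) : Decidable (Spec_char_to_line_column_py source_code char_pos out) := by unfold Spec_char_to_line_column_py; infer_instance

-- ===== CLAIM (what is proved, stated in full; the proofs are below) =====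
def Claim_equal_char_to_line_column_py : Prop := ∀ (source_code : String) (char_pos : Int), Dom_char_to_line_column_py source_code char_pos → Spec_char_to_line_column_py source_code char_pos (char_to_line_column_py source_code char_pos)

-- ===== LEMMAS AND PROOFS =====

-- [c0] is a prefix of a nonempty list iff its head is c0
theorem isPrefixOf_single_cons (c0 h : Char) (r : List Char) :
    List.isPrefixOf [c0] (h :: r) = (c0 == h) := by
  simp [List.isPrefixOf]

-- definitional equations of the PySem scan workers
theorem rfind_go_zero (s sub : List Char) :
    PySem.Chars.rfind.go s sub 0 = if sub.isPrefixOf s then 0 else -1 := rfl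

theorem rfind_go_succ (s sub : List Char) (j : Nat) :
    PySem.Chars.rfind.go s sub (j + 1) =
      if sub.isPrefixOf (s.drop (j + 1)) then ((j : Int) + 1)
      else PySem.Chars.rfind.go s sub j := rfl

theorem count_go_nil (sub : List Char) (fuel acc : Nat) :
    PySem.Chars.count.go sub fuel [] acc = acc := by cases fuel <;> rfl

theorem count_go_succ_cons (sub : List Char) (fuel : Nat) (h : Char) (t : List Char) (acc : Nat) :
    PySem.Chars.count.go sub (fuel + 1) (h :: t) acc =
      if sub.isPrefixOf (h :: t)
      then PySem.Chars.count.go sub fuel (List.drop sub.length (h :: t)) (acc + 1)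
      else PySem.Chars.count.go sub fuel t acc := rfl

-- Chars.count with a single-character needle is List.count
theorem count_go_single (c0 : Char) (l : List Char) :
    ∀ (fuel acc : Nat), l.length ≤ fuel →
      PySem.Chars.count.go [c0] fuel l acc = acc + l.count c0 := by
  induction l with
  | nil => intro fuel acc _; rw [count_go_nil]; simp
  | cons h t ih =>
    intro fuel acc hf
    cases fuel with
    | zero => simp at hf
    | succ fuel =>
      rw [count_go_succ_cons, isPrefixOf_single_cons]
      by_cases hc : c0 = h
      · subst hc
        simp only [BEq.rfl, if_true, List.length_cons, List.length_nil, Nat.zero_add,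
          List.drop_succ_cons, List.drop_zero]
        rw [ih fuel (acc + 1) (by simpa using hf)]
        rw [List.count_cons]
        simp
        omega
      · have hb : (c0 == h) = false := by simp [hc]
        rw [hb]
        simp only [Bool.false_eq_true, if_false]
        rw [ih fuel acc (by simpa using hf)]
        rw [List.count_cons]
        have hb2 : (h == c0) = false := beq_eq_false_iff_ne.mpr (Ne.symm hc)
        simp [hb2]

theorem count_single (t : List Char) (c0 : Char) :
    PySem.Chars.count t [c0] = t.count c0 := by
  have h := count_go_single c0 t t.length 0 (le_refl _)
  simpa [PySem.Chars.count] using h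

-- rfind.go agrees on t and t ++ [c] for indices strictly inside t
theorem rfind_go_snoc (t : List Char) (c c0 : Char) :
    ∀ x, x < t.length →
      PySem.Chars.rfind.go (t ++ [c]) [c0] x = PySem.Chars.rfind.go t [c0] x := by
  intro x
  induction x with
  | zero =>
    intro hx
    rw [rfind_go_zero, rfind_go_zero]
    cases t with
    | nil => simp at hx
    | cons h r => simp [isPrefixOf_single_cons]
  | succ j ih =>
    intro hx
    rw [rfind_go_succ, rfind_go_succ]
    have hd : List.drop (j + 1) (t ++ [c]) = List.drop (j + 1) t ++ [c] := by
      rw [List.drop_append_of_le_length (by omega)]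
    rw [hd]
    cases hdt : List.drop (j + 1) t with
    | nil => have := List.drop_eq_nil_iff.mp hdt; omega
    | cons h r =>
      simp only [List.cons_append, isPrefixOf_single_cons]
      by_cases hc : (c0 == h) = true
      · simp [hc]
      · simp only [Bool.not_eq_true] at hc
        simp only [hc, Bool.false_eq_true, if_false]
        exact ih (by omega)

-- rfind of a single character over a snoc
theorem rfind_snoc (t : List Char) (c c0 : Char) :
    PySem.Chars.rfind (t ++ [c]) [c0] =
      if c = c0 then (t.length : Int) else PySem.Chars.rfind t [c0] := by
  unfold PySem.Chars.rfind
  have hlen1 : (t ++ [c]).length = t.length + 1 := by simp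
  rw [hlen1, rfind_go_succ]
  have hd : List.drop (t.length + 1) (t ++ [c]) = [] := by
    apply List.drop_eq_nil_iff.mpr; simp
  rw [hd]
  simp only [show List.isPrefixOf [c0] ([] : List Char) = false from rfl,
    Bool.false_eq_true, if_false]
  cases t with
  | nil =>
    rw [show ([] : List Char).length = 0 from rfl, rfind_go_zero, rfind_go_zero]
    simp only [List.nil_append, isPrefixOf_single_cons]
    by_cases hc : c = c0
    · subst hc; simp
    · have hb : (c0 == c) = false := beq_eq_false_iff_ne.mpr (Ne.symm hc)
      simp [hb, hc]
  | cons h r =>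
    rw [show (h :: r).length = r.length + 1 from rfl, rfind_go_succ]
    have hd2 : List.drop (r.length + 1) ((h :: r) ++ [c]) = [c] := by
      rw [List.drop_append_of_le_length (by simp)]
      simp
    rw [hd2, isPrefixOf_single_cons]
    conv_rhs => rw [rfind_go_succ]
    have hd3 : List.drop (r.length + 1) (h :: r) = [] := by
      apply List.drop_eq_nil_iff.mpr; simp
    rw [hd3]
    simp only [show List.isPrefixOf [c0] ([] : List Char) = false from rfl,
      Bool.false_eq_true, if_false]
    by_cases hc : c = c0
    · subst hc
      simp only [BEq.rfl, if_true]
      push_cast; ring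
    · have hb : (c0 == c) = false := beq_eq_false_iff_ne.mpr (Ne.symm hc)
      rw [hb]
      simp only [Bool.false_eq_true, if_false, if_neg hc]
      exact rfind_go_snoc (h :: r) c c0 r.length (by simp)

-- the fused scan computes (1 + #newlines, pos - last newline index) over the prefix
theorem loop_eq (t : List Char) :
    t.foldl
      (fun (lc : Int × Int) (c : Char) =>
        if (some c == some '\n') = true then (lc.1 + 1, 1) else (lc.1, lc.2 + 1))
      (1, 1)
    = (1 + (PySem.Chars.count t ['\n'] : Int), (t.length : Int) - PySem.Chars.rfind t ['\n']) := by
  induction t using List.reverseRecOn with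
  | nil => rfl
  | append_singleton t c ih =>
    rw [List.foldl_append, ih]
    simp only [List.foldl_cons, List.foldl_nil, count_single, rfind_snoc,
      List.count_append, List.length_append]
    by_cases hc : c = '\n'
    · subst hc
      simp only [BEq.rfl, if_true, Prod.mk.injEq]
      refine ⟨?_, ?_⟩
      · simp; ring
      · simp
    · have h1 : (some c == some '\n') = false := by simp [hc]
      rw [h1]
      simp only [Bool.false_eq_true, if_false, if_neg hc, Prod.mk.injEq]
      refine ⟨?_, ?_⟩
      · have h0 : List.count '\n' [c] = 0 := List.count_eq_zero.mpr (by simp [Ne.symm hc])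
        simp [h0]
      · simp only [List.length_singleton]; push_cast; ring

-- ===== VERDICT (by name: the statement is the Claim_ definition above) =====
theorem char_to_line_column_py_spec : Claim_equal_char_to_line_column_py := by
  intro source_code char_pos _
  unfold Spec_char_to_line_column_py char_to_line_column_py char_to_line_column_py_alt
  by_cases hneg : char_pos < 0
  · simp [hneg]
  · simp only [hneg, if_false]
    set l := source_code.toList with hl
    have hlen : PySem.Str.len source_code = (l.length : Int) := PySem.Str.len_eq source_code
    set cp : Int := min char_pos (PySem.Str.len source_code) with hcp
    have hcp0 : 0 ≤ cp := by
      rw [hcp, hlen]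
      exact le_min (by omega) (by positivity)
    have hcple : cp ≤ (l.length : Int) := by rw [hcp, hlen]; exact min_le_right _ _
    set n : Nat := cp.toNat with hn
    have hncp : (n : Int) = cp := Int.toNat_of_nonneg hcp0
    have hnle : n ≤ l.length := by omega
    set t : List Char := l.take n with ht
    have htlen : t.length = n := by simp [ht]; omega
    set f : Int × Int → Char → Int × Int :=
      fun lc c => if (some c == some '\n') = true then (lc.1 + 1, 1) else (lc.1, lc.2 + 1) with hf
    -- B's side reduces to Chars.count / Chars.rfind on the prefix t
    have hpre : (PySem.Str.slice source_code none (some cp)).toList = t := by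
      rw [PySem.Str.toList_slice, PySem.Chars.slice_eq_listSlice,
        PySem.List.slice_to _ hcp0]
    have hcount : PySem.Str.count (PySem.Str.slice source_code none (some cp)) "\n"
        = PySem.Chars.count t ['\n'] := by
      rw [PySem.Str.count_eq, hpre]; rfl
    have hrfind : PySem.Str.rfind (PySem.Str.slice source_code none (some cp)) "\n"
        = PySem.Chars.rfind t ['\n'] := by
      rw [PySem.Str.rfind_eq, hpre]; rfl
    rw [hcount, hrfind]
    -- A's side: the index loop over range(cp) is the char loop over the prefix t
    have hrange : PySem.List.pyRange 0 cp = PySem.List.pyRange 0 (PySem.List.len t) := by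
      simp [PySem.List.len, htlen, hncp]
    have hbody : (PySem.List.pyRange 0 cp).foldl
        (fun (lc : Int × Int) i =>
          if PySem.Str.pyGet? source_code i == some '\n' then (lc.1 + 1, 1) else (lc.1, lc.2 + 1))
        (1, 1)
      = (PySem.List.pyRange 0 (PySem.List.len t)).foldl
          (fun acc j => f acc (PySem.List.pyGetD t j ' ')) (1, 1) := by
      rw [hrange]
      apply PySem.List.foldl_congr_mem
      intro acc x hx
      have hxr := PySem.List.mem_pyRange_one.mp hx
      have hx0 : 0 ≤ x := hxr.1
      have hxlt : x < (n : Int) := by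
        have h2 := hxr.2
        simpa [PySem.List.len, htlen] using h2
      have hxltl : x < (l.length : Int) := by omega
      have hget : PySem.Str.pyGet? source_code x = some (l[x.toNat]'(by omega)) := by
        rw [show PySem.Str.pyGet? source_code x = PySem.List.pyGet? l x from rfl]
        exact PySem.List.pyGet?_eq_some_getElem l hx0 hxltl
      have hgetd : PySem.List.pyGetD t x ' ' = t[x.toNat]'(by omega) := by
        apply PySem.List.pyGetD_eq_getElem t ' ' hx0
        rw [htlen]; exact hxlt
      have hsame : t[x.toNat]'(by omega) = l[x.toNat]'(by omega) := by
        simp [ht]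
      rw [hget, hf, hgetd, hsame]
    rw [hbody]
    have hmain := PySem.List.foldl_pyRange_pyGetD t ' ' f ((1 : Int), (1 : Int)) (le_refl (0 : Int))
    simp only [Int.toNat_zero, List.drop_zero] at hmain
    rw [hmain, hf, loop_eq t, htlen, hncp]
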